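-- pv_equiv track=rewrite | github.com/goodminjeong/programmers | Day3/01_ABC_abc.py | solution
-- ===== SOURCE A (Python) =====
-- def solution(my_string):
--     answer = ''
--     for string in my_string:
--         if string.isupper():
--             answer = string.lower()
--         else:
--             answer = string.upper()
--     return answer
-- ===== SOURCE B (Python) =====
-- def solution(my_string):
--     if not my_string:
--         return ''
--     c = my_string[-1]
--     return c.lower() if c.isupper() else c.upper()
-- ===== Notes on version B (the rewrite author's own statement) =====
-- stated objective: faster
-- what changed: A loops over the whole string overwriting the answer each step; B reads only the last character and applies the same isupper-based case swap directly, with an explicit guard returning the empty string when the input is empty.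
import Mathlib
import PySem

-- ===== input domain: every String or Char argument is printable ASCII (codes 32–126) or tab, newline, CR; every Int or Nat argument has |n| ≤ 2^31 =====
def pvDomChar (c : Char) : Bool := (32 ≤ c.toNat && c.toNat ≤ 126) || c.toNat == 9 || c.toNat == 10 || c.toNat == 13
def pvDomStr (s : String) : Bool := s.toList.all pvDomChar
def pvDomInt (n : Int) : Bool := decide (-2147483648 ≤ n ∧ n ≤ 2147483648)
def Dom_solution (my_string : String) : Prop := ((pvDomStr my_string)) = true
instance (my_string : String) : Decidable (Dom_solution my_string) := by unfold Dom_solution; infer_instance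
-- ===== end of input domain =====

-- B reads only the last character and applies the same isupper-based case swap; A scans the whole string (return value only, no side effects).

-- ===== PORT A =====
-- the per-character swap A applies (its result overwrites the accumulator each iteration)
def pvSwapA (c : Char) : String :=
  if PySem.Chars.isupper c then String.mk [PySem.Chars.lowerChar c]
  else String.mk [PySem.Chars.upperChar c]

def solution (my_string : String) : String :=
  my_string.toList.foldl (fun _answer c => pvSwapA c) ""

-- ===== PORT B =====
def solution_alt (my_string : String) : String :=
  match my_string.toList.getLast? with
  | none => ""
  | some c =>
    if PySem.Chars.isupper c then String.mk [PySem.Chars.lowerChar c]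
    else String.mk [PySem.Chars.upperChar c]

-- ===== PRECONDITION & SPEC =====
def Spec_solution (my_string : String) (out : String) : Prop := out = solution_alt my_string
instance (my_string : String) (out : String) : Decidable (Spec_solution my_string out) := by unfold Spec_solution; infer_instance

-- ===== CLAIM (what is proved, stated in full; the proofs are below) =====
def Claim_equal_solution : Prop := ∀ (my_string : String), Dom_solution my_string → Spec_solution my_string (solution my_string)

-- ===== LEMMAS AND PROOFS =====
theorem foldl_const_last {α β : Type} (g : α → β) :
    ∀ (l : List α) (acc : β),
      l.foldl (fun _ c => g c) acc = (match l.getLast? with | none => acc | some c => g c) := by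
  intro l
  induction l with
  | nil => intro acc; rfl
  | cons c l ih =>
    intro acc
    cases l with
    | nil => rfl
    | cons d l' => simpa using ih (g c)

-- ===== VERDICT (by name: the statement is the Claim_ definition above) =====
theorem solution_spec : Claim_equal_solution := by
  intro s _
  unfold Spec_solution solution solution_alt
  rw [foldl_const_last (g := pvSwapA)]
  cases h : s.toList.getLast? with
  | none => rfl
  | some c => simp [pvSwapA]
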